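-- pv_equiv track=rewrite | github.com/eliottcassidy2000/math | 04-computation/per_W_analysis.py | compute_det_W
-- ===== SOURCE A (Python) =====
-- from itertools import permutations, combinations
--
-- def compute_det_W(adj, n):
--     """det(W(x)) as polynomial in x."""
--     det = [0]*(n+1)
--     for sigma in permutations(range(n)):
--         if any(sigma[i] == i for i in range(n)):
--             continue
--         fwd = sum(1 for i in range(n) if adj[i][sigma[i]])
--         # Sign of permutation
--         inv = sum(1 for i in range(n) for j in range(i+1, n) if sigma[i] > sigma[j])
--         sign = (-1)**inv
--         det[fwd] += sign
--     return det
-- ===== SOURCE B (Python) =====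
-- def compute_det_W(adj, n):
--     """det(W(x)) as polynomial in x.
--
--     Backtracking over derangements: positions are filled left to right from the
--     sorted list of still-unused values, skipping fixed points immediately, while
--     the forward-edge count and the permutation sign are maintained incrementally
--     (choosing the k-th smallest remaining value flips the sign iff k is odd), so
--     no permutation is ever materialised and no inversion count is ever computed.
--     """
--     det = [0] * (n + 1)
--
--     def go(pos, rem, fwd, sign):
--         if not rem:
--             det[fwd] += sign
--             return
--         for k in range(len(rem)):
--             v = rem[k]
--             if v != pos:
--                 go(pos + 1, rem[:k] + rem[k+1:],
--                    fwd + (1 if adj[pos][v] else 0),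
--                    -sign if k % 2 else sign)
--
--     go(0, list(range(n)), 0, 1)
--     return det
-- ===== Notes on version B (the rewrite author's own statement) =====
-- stated objective: alternative
-- what changed: Instead of enumerating all n! permutations with itertools and then filtering fixed points and counting inversions with O(n^2) scans per permutation, B backtracks over derangements directly: it fills positions left to right from the sorted list of unused values, prunes any fixed point as soon as it would be placed, and maintains the forward-edge count and the permutation sign incrementally (picking the k-th smallest remaining value flips the sign iff k is odd), so no permutation tuple is built and no inversion count is computed; …
import Mathlib
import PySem

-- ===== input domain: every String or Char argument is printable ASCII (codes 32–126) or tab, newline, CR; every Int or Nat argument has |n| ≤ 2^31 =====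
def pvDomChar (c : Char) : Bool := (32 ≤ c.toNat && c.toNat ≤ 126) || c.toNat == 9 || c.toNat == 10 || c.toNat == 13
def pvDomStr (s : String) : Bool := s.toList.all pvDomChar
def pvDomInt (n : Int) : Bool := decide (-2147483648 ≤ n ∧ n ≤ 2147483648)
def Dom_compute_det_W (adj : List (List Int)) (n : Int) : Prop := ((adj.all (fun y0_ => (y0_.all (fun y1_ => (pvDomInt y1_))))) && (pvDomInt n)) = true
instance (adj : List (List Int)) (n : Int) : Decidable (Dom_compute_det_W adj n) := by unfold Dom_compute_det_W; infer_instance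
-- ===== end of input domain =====

-- B replaces A's filter-all-n!-permutations loop by a backtracking recursion over derangements
-- with incrementally maintained forward-edge count and sign (an alternative algorithm, same result).

-- ===== PORT A =====
def compute_det_W (adj : List (List Int)) (n : Int) : List Int :=
  let det : List Int := List.replicate (n + 1).toNat 0
  (PySem.List.permutations (PySem.List.pyRange 0 n 1) (PySem.List.pyRange 0 n 1).length).foldl
    (fun det sigma =>
      if (PySem.List.pyRange 0 n 1).any (fun i => PySem.List.pyGetD sigma i 0 == i) then det
      else
        let fwd : Int := (PySem.List.pyRange 0 n 1).foldl
          (fun a i => if PySem.List.pyGetD (PySem.List.pyGetD adj i []) (PySem.List.pyGetD sigma i 0) 0 ≠ 0 then a + 1 else a) 0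
        let inv : Int := (PySem.List.pyRange 0 n 1).foldl
          (fun a i => (PySem.List.pyRange (i + 1) n 1).foldl
            (fun b j => if PySem.List.pyGetD sigma j 0 < PySem.List.pyGetD sigma i 0 then b + 1 else b) a) 0
        let sign : Int := (-1) ^ inv.toNat
        PySem.List.pySetD det fwd (PySem.List.pyGetD det fwd 0 + sign))
    det

-- ===== PORT B =====
def goB (adj : List (List Int)) (fuel : Nat) (pos : Int) (rem : List Int) (fwd : Int) (sign : Int) (det : List Int) : List Int :=
  if rem.isEmpty then PySem.List.pySetD det fwd (PySem.List.pyGetD det fwd 0 + sign)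
  else
    match fuel with
    | 0 => det  -- fuel guard only (the call sites keep fuel = rem.length, so this is never reached)
    | fuel' + 1 =>
      (PySem.List.pyRange 0 rem.length 1).foldl
        (fun d k =>
          let v := PySem.List.pyGetD rem k 0
          if v ≠ pos then
            goB adj fuel' (pos + 1)
              (PySem.List.slice rem none (some k) ++ PySem.List.slice rem (some (k + 1)) none)
              (fwd + if PySem.List.pyGetD (PySem.List.pyGetD adj pos []) v 0 ≠ 0 then 1 else 0)
              (if PySem.Int.mod k 2 ≠ 0 then -sign else sign) d
          else d)
        det

def compute_det_W_alt (adj : List (List Int)) (n : Int) : List Int :=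
  let det : List Int := List.replicate (n + 1).toNat 0
  let rem := PySem.List.pyRange 0 n 1
  goB adj rem.length 0 rem 0 1 det

-- ===== PRECONDITION & SPEC =====
-- Pre_ excludes exactly the inputs on which the Python A raises IndexError: n < 0 (det[0] on an
-- empty coefficient list), or an adjacency list lacking an entry adj[i][j] with i ≠ j, i, j < n
-- (every such entry is read by both programs when n ≥ 2).
def Pre_compute_det_W (adj : List (List Int)) (n : Int) : Prop :=
  0 ≤ n ∧ (n < 2 ∨ (n ≤ (adj.length : Int) ∧
    ∀ i < n.toNat, (n - (if (i : Int) = n - 1 then 1 else 0)) ≤ ((adj.getD i []).length : Int)))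
instance (adj : List (List Int)) (n : Int) : Decidable (Pre_compute_det_W adj n) := by unfold Pre_compute_det_W; infer_instance
def pvWitness_compute_det_W : List (List Int) × Int := ([[0, 1], [1, 0]], 2)

def Spec_compute_det_W (adj : List (List Int)) (n : Int) (out : List Int) : Prop := out = compute_det_W_alt adj n
instance (adj : List (List Int)) (n : Int) (out : List Int) : Decidable (Spec_compute_det_W adj n out) := by unfold Spec_compute_det_W; infer_instance

-- ===== CLAIM (what is proved, stated in full; the proofs are below) =====
def Claim_equal_compute_det_W : Prop := ∀ (adj : List (List Int)) (n : Int), Dom_compute_det_W adj n → Pre_compute_det_W adj n → Spec_compute_det_W adj n (compute_det_W adj n)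

-- ===== LEMMAS AND PROOFS =====

lemma pyRange_shift (L : Nat) :
    PySem.List.pyRange 1 ((L : Int) + 1) 1 = (PySem.List.pyRange 0 (L : Int) 1).map (fun k => 1 + k) := by
  simp [PySem.List.pyRange_one, List.map_map, Function.comp_def]

lemma pyGetD_succ (p : List Int) (v d : Int) (k : Int) (h : 0 ≤ k) :
    PySem.List.pyGetD (v :: p) (k + 1) d = PySem.List.pyGetD p k d := by
  obtain ⟨m, rfl⟩ := Int.eq_ofNat_of_zero_le h
  have : (m : Int) + 1 = ((m + 1 : Nat) : Int) := by push_cast; ring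
  rw [this, PySem.List.pyGetD_natCast, PySem.List.pyGetD_natCast]
  rfl

lemma anyCongrMem {α : Type} (l : List α) (p q : α → Bool) (h : ∀ x ∈ l, p x = q x) :
    l.any p = l.any q := by
  induction l with
  | nil => rfl
  | cons x xs ih =>
    simp only [List.any_cons, h x (List.mem_cons_self), ih (fun y hy => h y (List.mem_cons_of_mem _ hy))]

def hasFixAux (pos : Int) : List Int → Bool
  | [] => false
  | v :: p => v == pos || hasFixAux (pos + 1) p

lemma len_cons_cast (v : Int) (p : List Int) : (((v :: p).length : Nat) : Int) = (p.length : Int) + 1 := by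
  push_cast [List.length_cons]; ring

lemma any_eq_hasFixAux (σ : List Int) (pos : Int) :
    (PySem.List.pyRange 0 (σ.length : Int) 1).any (fun i => PySem.List.pyGetD σ i 0 == pos + i)
      = hasFixAux pos σ := by
  induction σ generalizing pos with
  | nil => simp [PySem.List.pyRange_one_eq_nil, hasFixAux]
  | cons v p ih =>
    rw [len_cons_cast, PySem.List.pyRange_one_cons (by positivity), List.any_cons, zero_add, pyRange_shift,
      List.any_map]
    have h2 : (PySem.List.pyRange 0 ((p.length : Nat) : Int) 1).any
        ((fun i => PySem.List.pyGetD (v :: p) i 0 == pos + i) ∘ (fun k => 1 + k))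
        = (PySem.List.pyRange 0 ((p.length : Nat) : Int) 1).any
          (fun k => PySem.List.pyGetD p k 0 == (pos + 1) + k) := by
      apply anyCongrMem
      intro k hk
      have h0 : 0 ≤ k := ((PySem.List.mem_pyRange_one).1 hk).1
      show (PySem.List.pyGetD (v :: p) (1 + k) 0 == pos + (1 + k))
          = (PySem.List.pyGetD p k 0 == (pos + 1) + k)
      rw [add_comm 1 k, pyGetD_succ p v 0 k h0, show pos + (k + 1) = (pos + 1) + k by ring]
    rw [h2, ih (pos + 1)]
    simp [hasFixAux, PySem.List.pyGetD_zero_cons]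

def wA (adj : List (List Int)) (pos v : Int) : Int :=
  if PySem.List.pyGetD (PySem.List.pyGetD adj pos []) v 0 ≠ 0 then 1 else 0

def fwdAux (adj : List (List Int)) (pos : Int) : List Int → Int
  | [] => 0
  | v :: p => wA adj pos v + fwdAux adj (pos + 1) p

lemma foldl_eq_fwdAux (adj : List (List Int)) (σ : List Int) (pos c : Int) :
    (PySem.List.pyRange 0 (σ.length : Int) 1).foldl
        (fun a i => if PySem.List.pyGetD (PySem.List.pyGetD adj (pos + i) []) (PySem.List.pyGetD σ i 0) 0 ≠ 0 then a + 1 else a) c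
      = c + fwdAux adj pos σ := by
  induction σ generalizing pos c with
  | nil => simp [PySem.List.pyRange_one_eq_nil, fwdAux]
  | cons v p ih =>
    rw [len_cons_cast, PySem.List.pyRange_one_cons (by positivity), List.foldl_cons, zero_add,
      pyRange_shift, List.foldl_map]
    have hcong : ∀ (a : Int), ∀ k ∈ PySem.List.pyRange 0 ((p.length : Nat) : Int) 1,
        (fun (a : Int) k => if PySem.List.pyGetD (PySem.List.pyGetD adj (pos + (1 + k)) []) (PySem.List.pyGetD (v :: p) (1 + k) 0) 0 ≠ 0 then a + 1 else a) a k
          = (fun (a : Int) k => if PySem.List.pyGetD (PySem.List.pyGetD adj ((pos + 1) + k) []) (PySem.List.pyGetD p k 0) 0 ≠ 0 then a + 1 else a) a k := by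
      intro a k hk
      have h0 : 0 ≤ k := ((PySem.List.mem_pyRange_one).1 hk).1
      simp only
      rw [add_comm 1 k, pyGetD_succ p v 0 k h0, show pos + (k + 1) = (pos + 1) + k by ring]
    rw [PySem.List.foldl_congr_mem _ _ _ _ hcong, ih]
    simp only [fwdAux, wA, PySem.List.pyGetD_zero_cons, add_zero]
    split <;> ring

def invAux : List Int → Nat
  | [] => 0
  | v :: p => p.countP (fun x => decide (x < v)) + invAux p

lemma foldl_eq_invAux (σ : List Int) (c : Int) :
    (PySem.List.pyRange 0 (σ.length : Int) 1).foldl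
        (fun a i => a + ((σ.drop (i + 1).toNat).countP (fun x => decide (x < PySem.List.pyGetD σ i 0)) : Int)) c
      = c + invAux σ := by
  induction σ generalizing c with
  | nil => simp [PySem.List.pyRange_one_eq_nil, invAux]
  | cons v p ih =>
    rw [len_cons_cast, PySem.List.pyRange_one_cons (by positivity), List.foldl_cons, zero_add,
      pyRange_shift, List.foldl_map]
    have hcong : ∀ (a : Int), ∀ k ∈ PySem.List.pyRange 0 ((p.length : Nat) : Int) 1,
        (fun (a : Int) k => a + (((v :: p).drop (k + 1 + 1).toNat).countP (fun x => decide (x < PySem.List.pyGetD (v :: p) (k + 1) 0)) : Int)) a k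
          = (fun (a : Int) k => a + ((p.drop (k + 1).toNat).countP (fun x => decide (x < PySem.List.pyGetD p k 0)) : Int)) a k := by
      intro a k hk
      have h0 : 0 ≤ k := ((PySem.List.mem_pyRange_one).1 hk).1
      have hdrop : (k + 1 + 1).toNat = (k + 1).toNat + 1 := by omega
      simp only
      rw [pyGetD_succ p v 0 k h0, hdrop, List.drop_succ_cons]
    have hshape : ∀ (a : Int), ∀ k ∈ PySem.List.pyRange 0 ((p.length : Nat) : Int) 1,
        (fun (a : Int) k => a + (((v :: p).drop (1 + k + 1).toNat).countP (fun x => decide (x < PySem.List.pyGetD (v :: p) (1 + k) 0)) : Int)) a k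
          = (fun (a : Int) k => a + ((p.drop (k + 1).toNat).countP (fun x => decide (x < PySem.List.pyGetD p k 0)) : Int)) a k := by
      intro a k hk
      have := hcong a k hk
      simpa [add_comm 1 k] using this
    rw [PySem.List.foldl_congr_mem _ _ _ _ hshape, ih]
    have hd1 : List.drop (Int.toNat 1) (v :: p) = p := rfl
    rw [hd1, PySem.List.pyGetD_zero_cons]
    simp only [invAux]
    push_cast
    ring

lemma countP_eraseIdx_sorted (rem : List Int) (k : Nat) (hk : k < rem.length)
    (hs : rem.Pairwise (· < ·)) :
    (rem.eraseIdx k).countP (fun x => decide (x < rem.getD k 0)) = k := by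
  have hg := List.pairwise_iff_getElem.mp hs
  rw [List.eraseIdx_eq_take_drop_succ, List.countP_append, List.getD_eq_getElem rem 0 hk]
  have h1 : (rem.take k).countP (fun x => decide (x < rem[k])) = (rem.take k).length := by
    rw [List.countP_eq_length]
    intro x hx
    obtain ⟨j, hj, hxe⟩ := List.mem_take_iff_getElem.mp hx
    subst hxe
    simpa using hg j k (by omega) hk (by omega)
  have h2 : (rem.drop (k + 1)).countP (fun x => decide (x < rem[k])) = 0 := by
    rw [List.countP_eq_zero]
    intro x hx
    obtain ⟨j, hj, hxe⟩ := List.mem_iff_getElem.mp hx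
    rw [List.getElem_drop] at hxe
    subst hxe
    have := hg k (k + 1 + j) hk (by simp at hj; omega) (by omega)
    simp only [decide_eq_true_eq]
    omega
  rw [h1, h2, List.length_take]
  omega

def stepAbs (adj : List (List Int)) (pos fwd0 sign0 : Int) (d : List Int) (σ : List Int) : List Int :=
  if hasFixAux pos σ then d
  else PySem.List.pySetD d (fwd0 + fwdAux adj pos σ)
        (PySem.List.pyGetD d (fwd0 + fwdAux adj pos σ) 0 + sign0 * (-1) ^ invAux σ)

lemma foldl_stepAbs_fix (adj : List (List Int)) (pos fwd0 sign0 : Int) (d : List Int)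
    (v : Int) (hv : v = pos) (X : List (List Int)) :
    (X.map (fun σ => v :: σ)).foldl (stepAbs adj pos fwd0 sign0) d = d := by
  induction X generalizing d with
  | nil => rfl
  | cons σ X ih =>
    simp only [List.map_cons, List.foldl_cons]
    rw [show stepAbs adj pos fwd0 sign0 d (v :: σ) = d by simp [stepAbs, hasFixAux, hv], ih]

lemma sign_if_eq (s : Int) (k : Nat) :
    (if PySem.Int.mod (k : Int) 2 ≠ 0 then -s else s) = s * (-1) ^ k := by
  have hm := PySem.Int.mod_natCast k 2
  rw [show (((2 : Nat) : Int)) = 2 from rfl] at hm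
  rw [hm]
  rcases Nat.even_or_odd k with h | h
  · simp [Nat.even_iff.mp h, h.neg_one_pow]
  · simp [Nat.odd_iff.mp h, h.neg_one_pow]

lemma stepAbs_cons (adj : List (List Int)) (pos fwd0 sign0 : Int) (d : List Int)
    (v : Int) (σ : List Int) (k : Nat) (hv : ¬ v = pos)
    (hcnt : σ.countP (fun x => decide (x < v)) = k) :
    stepAbs adj pos fwd0 sign0 d (v :: σ)
      = stepAbs adj (pos + 1) (fwd0 + wA adj pos v) (sign0 * (-1) ^ k) d σ := by
  have hb : (v == pos) = false := by simp [hv]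
  simp only [stepAbs, hasFixAux, fwdAux, invAux, hcnt, hb, Bool.false_or]
  split
  · rfl
  · rw [← add_assoc, pow_add, ← mul_assoc]

lemma perms_succ (xs : List Int) (r : Nat) :
    PySem.List.permutations xs (r + 1)
      = (List.range xs.length).flatMap
          (fun i => (PySem.List.permutations (xs.eraseIdx i) r).map (fun p => xs.getD i 0 :: p)) := by
  conv_lhs => rw [PySem.List.permutations]
  apply List.flatMap_congr
  intro i hi
  have hlt : i < xs.length := List.mem_range.mp hi
  rw [List.getElem?_eq_getElem hlt, List.getD_eq_getElem xs 0 hlt]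

lemma goB_eq (adj : List (List Int)) : ∀ (fuel : Nat) (rem : List Int) (pos fwd0 sign0 : Int) (det : List Int),
    rem.length = fuel → rem.Pairwise (· < ·) →
    goB adj fuel pos rem fwd0 sign0 det
      = (PySem.List.permutations rem rem.length).foldl (stepAbs adj pos fwd0 sign0) det := by
  intro fuel
  induction fuel with
  | zero =>
    intro rem pos f0 s0 det hlen _
    obtain rfl : rem = [] := List.length_eq_zero_iff.mp hlen
    simp [goB, stepAbs, hasFixAux, fwdAux, invAux]
  | succ fuel' ih =>
    intro rem pos f0 s0 det hlen hs
    obtain ⟨v0, rest, rfl⟩ : ∃ v0 rest, rem = v0 :: rest := by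
      cases rem with
      | nil => simp at hlen
      | cons a b => exact ⟨a, b, rfl⟩
    set rem := v0 :: rest with hrem
    rw [show goB adj (fuel' + 1) pos rem f0 s0 det
        = (PySem.List.pyRange 0 rem.length 1).foldl
            (fun d k =>
              if PySem.List.pyGetD rem k 0 ≠ pos then
                goB adj fuel' (pos + 1)
                  (PySem.List.slice rem none (some k) ++ PySem.List.slice rem (some (k + 1)) none)
                  (f0 + if PySem.List.pyGetD (PySem.List.pyGetD adj pos [])
                          (PySem.List.pyGetD rem k 0) 0 ≠ 0 then 1 else 0)
                  (if PySem.Int.mod k 2 ≠ 0 then -s0 else s0) d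
              else d) det from rfl]
    rw [show rem.length = fuel' + 1 from hlen, perms_succ, List.foldl_flatMap,
      PySem.List.pyRange_zero_nat, List.foldl_map]
    rw [show (fuel' + 1) = rem.length from hlen.symm]
    apply PySem.List.foldl_congr_mem
    intro d k hk
    have hklt : k < rem.length := List.mem_range.mp hk
    have hv : PySem.List.pyGetD rem (k : Int) 0 = rem.getD k 0 := PySem.List.pyGetD_natCast rem k 0
    have he : (rem.eraseIdx k).length = fuel' := by
      rw [List.length_eraseIdx]
      simp only [if_pos hklt]
      omega
    have hslice : PySem.List.slice rem none (some (k : Int)) ++ PySem.List.slice rem (some ((k : Int) + 1)) none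
        = rem.eraseIdx k := by
      have h1 : ((k : Int) + 1) = ((k + 1 : Nat) : Int) := by push_cast; ring
      rw [PySem.List.slice_to_natCast, h1, PySem.List.slice_from_natCast,
        List.eraseIdx_eq_take_drop_succ]
    have hsub : (rem.eraseIdx k).Pairwise (· < ·) := hs.sublist (List.eraseIdx_sublist rem k)
    simp only [hv]
    by_cases hfix : rem.getD k 0 = pos
    · rw [if_neg (by simp only [ne_eq, not_not]; exact hfix), foldl_stepAbs_fix adj pos f0 s0 d (rem.getD k 0) hfix]
    · rw [if_pos hfix, hslice, sign_if_eq,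
        ih (rem.eraseIdx k) (pos + 1) _ _ d he hsub, he, List.foldl_map]
      apply PySem.List.foldl_congr_mem
      intro d' sig hsig
      have hperm : sig.Perm (rem.eraseIdx k) := by
        rw [← he] at hsig
        exact PySem.List.perm_of_mem_permutations hsig
      have hcnt : sig.countP (fun x => decide (x < rem.getD k 0)) = k :=
        (hperm.countP_eq _).trans (countP_eraseIdx_sorted rem k hklt hs)
      rw [show (if PySem.List.pyGetD (PySem.List.pyGetD adj pos []) (rem.getD k 0) 0 ≠ 0
            then (1 : Int) else 0) = wA adj pos (rem.getD k 0) from rfl]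
      exact (stepAbs_cons adj pos f0 s0 d' (rem.getD k 0) sig k hfix hcnt).symm

set_option maxHeartbeats 1000000 in
lemma A_eq_fold (adj : List (List Int)) (n : Int) (hn : 0 ≤ n) :
    compute_det_W adj n
      = (PySem.List.permutations (PySem.List.pyRange 0 n 1) (PySem.List.pyRange 0 n 1).length).foldl
          (stepAbs adj 0 0 1) (List.replicate (n + 1).toNat 0) := by
  rw [show compute_det_W adj n
      = (PySem.List.permutations (PySem.List.pyRange 0 n 1) (PySem.List.pyRange 0 n 1).length).foldl
          (fun det sigma =>
            if (PySem.List.pyRange 0 n 1).any (fun i => PySem.List.pyGetD sigma i 0 == i) then det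
            else
              PySem.List.pySetD det
                ((PySem.List.pyRange 0 n 1).foldl
                  (fun a i => if PySem.List.pyGetD (PySem.List.pyGetD adj i []) (PySem.List.pyGetD sigma i 0) 0 ≠ 0 then a + 1 else a) (0 : Int))
                (PySem.List.pyGetD det
                  ((PySem.List.pyRange 0 n 1).foldl
                    (fun a i => if PySem.List.pyGetD (PySem.List.pyGetD adj i []) (PySem.List.pyGetD sigma i 0) 0 ≠ 0 then a + 1 else a) (0 : Int)) 0
                  + (-1) ^ ((PySem.List.pyRange 0 n 1).foldl
                      (fun a i => (PySem.List.pyRange (i + 1) n 1).foldl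
                        (fun b j => if PySem.List.pyGetD sigma j 0 < PySem.List.pyGetD sigma i 0 then b + 1 else b) a) (0 : Int)).toNat))
          (List.replicate (n + 1).toNat 0) from rfl]
  apply PySem.List.foldl_congr_mem
  intro d σ hσ
  have hperm := PySem.List.perm_of_mem_permutations hσ
  have hcast : (σ.length : Int) = n := by
    rw [hperm.length_eq, PySem.List.length_pyRange_one]
    omega
  rw [← hcast]
  have hany := any_eq_hasFixAux σ 0
  simp only [zero_add] at hany
  have hfwd := foldl_eq_fwdAux adj σ 0 0
  simp only [zero_add] at hfwd
  have hinner : ∀ (a : Int), ∀ i ∈ PySem.List.pyRange 0 (σ.length : Int) 1,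
      (fun (a : Int) i => (PySem.List.pyRange (i + 1) (σ.length : Int) 1).foldl
          (fun b j => if PySem.List.pyGetD σ j 0 < PySem.List.pyGetD σ i 0 then b + 1 else b) a) a i
        = (fun (a : Int) i => a + ((σ.drop (i + 1).toNat).countP (fun x => decide (x < PySem.List.pyGetD σ i 0)) : Int)) a i := by
    intro a i hi
    have h0 : (0 : Int) ≤ i + 1 := by
      have := ((PySem.List.mem_pyRange_one).1 hi).1
      omega
    simp only
    rw [PySem.List.foldl_pyRange_pyGetD' σ 0
        (fun b x => if x < PySem.List.pyGetD σ i 0 then b + 1 else b) a h0]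
    simpa using PySem.List.foldl_count_if (fun x => decide (x < PySem.List.pyGetD σ i 0))
      (List.drop (i + 1).toNat σ) a
  have hinv := foldl_eq_invAux σ 0
  rw [PySem.List.foldl_congr_mem _ _ _ _ hinner, hinv, zero_add, hany, hfwd]
  simp only [stepAbs, Int.toNat_natCast, zero_add, one_mul]

-- ===== VERDICT (by name: the statement is the Claim_ definition above) =====
theorem compute_det_W_spec : Claim_equal_compute_det_W := by
  intro adj n _ hpre
  unfold Spec_compute_det_W compute_det_W_alt
  rw [A_eq_fold adj n hpre.1]
  rw [goB_eq adj _ _ _ _ _ _ rfl (PySem.List.pairwise_lt_pyRange_one 0 n)]
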